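-- pv_equiv track=rewrite | github.com/OnlineFenix/newvip | django_project/views.py | Modifier
-- ===== SOURCE A (Python) =====
-- def Modifier(list):
--     if len(list) == 0:
--         for i in range(8):
--             list.append('--')
--     elif len(list) == 1:
--         for i in range(7):
--             list.append('--')
--     elif len(list) == 2:
--         for i in range(6):
--             list.append('--')
--     elif len(list) == 3:
--         for i in range(5):
--             list.append('--')
--     elif len(list) == 4:
--         for i in range(4):
--             list.append('--')
--     elif len(list) == 5:
--         for i in range(3):
--             list.append('--')
--     elif len(list) == 6:
--         for i in range(2):
--             list.append('--')
--     elif len(list) == 7: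
--         for i in range(1):
--             list.append('--')
--     else:
--         pass
--     return list
-- ===== SOURCE B (Python) =====
-- def Modifier(list):
--     n = len(list)
--     out = [list[i] if i < n else '--' for i in range(max(8, n))]
--     list[:] = out
--     return list
-- ===== Notes on version B (the rewrite author's own statement) =====
-- stated objective: alternative
-- what changed: Instead of dispatching on the length and appending '--' in per-length loops, B builds the whole result positionally in one comprehension over range(max(8, n)), taking the original element below n and '--' above, then writes it back in place.
import Mathlib
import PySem

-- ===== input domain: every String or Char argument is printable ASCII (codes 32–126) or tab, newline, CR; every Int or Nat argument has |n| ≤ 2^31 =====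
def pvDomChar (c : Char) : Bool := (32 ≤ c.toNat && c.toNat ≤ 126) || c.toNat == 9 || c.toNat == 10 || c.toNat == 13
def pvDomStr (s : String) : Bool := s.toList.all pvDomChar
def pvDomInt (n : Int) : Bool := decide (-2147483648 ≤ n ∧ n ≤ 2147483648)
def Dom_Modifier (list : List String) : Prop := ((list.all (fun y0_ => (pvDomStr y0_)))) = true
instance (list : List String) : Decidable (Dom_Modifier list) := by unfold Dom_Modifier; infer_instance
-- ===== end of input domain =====

-- B builds the result positionally instead of appending per-length; both A and B mutate the
-- argument in place (B via slice assignment), and the equivalence below is about the return value.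

-- ===== PORT A =====
-- 'for i in range(k): list.append("--")' as a fold over pyRange
def pvAppendLoop (l : List String) (k : Int) : List String :=
  (PySem.List.pyRange 0 k 1).foldl (fun acc _ => acc ++ ["--"]) l

def Modifier (list : List String) : List String :=
  if list.length = 0 then pvAppendLoop list 8
  else if list.length = 1 then pvAppendLoop list 7
  else if list.length = 2 then pvAppendLoop list 6
  else if list.length = 3 then pvAppendLoop list 5
  else if list.length = 4 then pvAppendLoop list 4
  else if list.length = 5 then pvAppendLoop list 3
  else if list.length = 6 then pvAppendLoop list 2
  else if list.length = 7 then pvAppendLoop list 1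
  else list

-- ===== PORT B =====
-- [list[i] if i < n else '--' for i in range(max(8, n))]; the guarded list[i] is always in range,
-- ported with pyGetD (exact here since 0 ≤ i < n on the branch taken)
def Modifier_alt (list : List String) : List String :=
  let n : Int := list.length
  (PySem.List.pyRange 0 (max 8 n) 1).map
    (fun i => if i < n then PySem.List.pyGetD list i "--" else "--")

-- ===== PRECONDITION & SPEC =====
def Spec_Modifier (list : List String) (out : List String) : Prop := out = Modifier_alt list
instance (list : List String) (out : List String) : Decidable (Spec_Modifier list out) := by unfold Spec_Modifier; infer_instance

-- ===== CLAIM =====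
def Claim_equal_Modifier : Prop := ∀ (list : List String), Dom_Modifier list → Spec_Modifier list (Modifier list)

-- ===== LEMMAS AND PROOFS =====
theorem foldl_dash {α : Type} (xs : List α) (l : List String) :
    xs.foldl (fun acc _ => acc ++ ["--"]) l = l ++ List.replicate xs.length "--" := by
  induction xs generalizing l with
  | nil => simp
  | cons x t ih => simp [List.foldl, ih, List.replicate_succ, List.append_assoc]

theorem pvAppendLoop_eq (l : List String) (k : Int) (_hk : 0 ≤ k) :
    pvAppendLoop l k = l ++ List.replicate k.toNat "--" := by
  unfold pvAppendLoop
  rw [foldl_dash, PySem.List.length_pyRange_one]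
  simp

-- B's positional build equals 'original list followed by the deficit of dashes'
theorem alt_eq (list : List String) :
    Modifier_alt list = list ++ List.replicate ((max 8 (list.length : Int)) - list.length).toNat "--" := by
  unfold Modifier_alt
  dsimp only
  rw [PySem.List.pyRange_one]
  apply List.ext_getElem
  · simp
  · intro i h1 h2
    simp only [List.getElem_map, List.getElem_range]
    have hi8 : i < ((max 8 (list.length : Int)) - 0).toNat := by simpa using h1
    by_cases hin : i < list.length
    · have hlt : ((0 : Int) + i) < (list.length : Int) := by omega
      rw [if_pos hlt]
      have : ((0 : Int) + i) = ((i : Nat) : Int) := by ring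
      rw [this, PySem.List.pyGetD_natCast]
      rw [List.getElem_append_left hin]
      simp [List.getD, hin]
    · have hge : ¬ ((0 : Int) + i) < (list.length : Int) := by omega
      rw [if_neg hge]
      rw [List.getElem_append_right (by omega)]
      simp

-- ===== VERDICT =====
theorem Modifier_spec : Claim_equal_Modifier := by
  intro list _
  unfold Spec_Modifier Modifier
  rw [alt_eq]
  split_ifs with h0 h1 h2 h3 h4 h5 h6 h7
  all_goals first
    | (rw [pvAppendLoop_eq _ _ (by omega)]; congr 2; omega)
    | (have : ((max 8 (list.length : Int)) - list.length).toNat = 0 := by omega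
       simp [this])
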